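-- pv_equiv track=rewrite | github.com/Trustyn/PythonPractice | WaffleIrons.py | WaffleIrons
-- ===== SOURCE A (Python) =====
-- def WaffleIrons(arr):
--     count = 0
--     temp = []
--     for i in range(len(arr)):
--         if(len(temp) > 0 and arr[i] >= temp[0]):
--             del temp[0]
--             temp.append(arr[i] + 5)
--         else:
--             temp.append(arr[i] + 5)
--             count = max(count,len(temp))
--     return count
-- ===== SOURCE B (Python) =====
-- def WaffleIrons(arr):
--     # Two-pointer scan: the simulated queue is always arr[h..i-1] each +5,
--     # and the tracked maximum equals the final queue length len(arr) - h.
--     h = 0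
--     for i in range(len(arr)):
--         if h < i and arr[i] >= arr[h] + 5:
--             h += 1
--     return len(arr) - h
-- ===== Notes on version B (the rewrite author's own statement) =====
-- stated objective: faster
-- what changed: Replaces the simulated list-queue (del temp[0] / append / running max) with a single integer head pointer h, returning len(arr)-h in closed form since the queue length never decreases.
import Mathlib
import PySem

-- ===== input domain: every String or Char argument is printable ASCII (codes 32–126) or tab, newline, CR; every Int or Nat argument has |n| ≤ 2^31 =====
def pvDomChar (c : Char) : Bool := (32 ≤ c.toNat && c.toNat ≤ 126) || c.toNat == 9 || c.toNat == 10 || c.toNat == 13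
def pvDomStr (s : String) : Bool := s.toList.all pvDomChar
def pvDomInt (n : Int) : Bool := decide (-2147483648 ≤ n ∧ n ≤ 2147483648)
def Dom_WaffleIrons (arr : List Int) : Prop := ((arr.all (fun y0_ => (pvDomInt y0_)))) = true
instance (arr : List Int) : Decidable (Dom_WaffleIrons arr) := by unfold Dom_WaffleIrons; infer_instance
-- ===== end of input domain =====

-- B replaces A's simulated list-queue with a single head pointer and a closed-form result (asymptotically faster).

-- ===== PORT A =====
-- literal port of A: a foldl over range(len(arr)) carrying (count, temp)
def WaffleIrons (arr : List Int) : Int :=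
  ((PySem.List.pyRange 0 arr.length 1).foldl
    (fun (st : Int × List Int) i =>
      let x := PySem.List.pyGetD arr i 0        -- arr[i], always in range here
      if 0 < st.2.length ∧ x ≥ PySem.List.pyGetD st.2 0 0 then
        (st.1, st.2.drop 1 ++ [x + 5])          -- del temp[0]; temp.append(arr[i]+5)
      else
        let temp' := st.2 ++ [x + 5]            -- temp.append(arr[i]+5)
        (max st.1 (temp'.length : Int), temp')  -- count = max(count, len(temp))
    ) (0, [])).1

-- ===== PORT B =====
-- literal port of B: a foldl over range(len(arr)) carrying the head pointer h
def WaffleIrons_alt (arr : List Int) : Int :=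
  (arr.length : Int) -
    (PySem.List.pyRange 0 arr.length 1).foldl
      (fun h i =>
        if h < i ∧ PySem.List.pyGetD arr i 0 ≥ PySem.List.pyGetD arr h 0 + 5 then h + 1 else h)
      0

-- ===== PRECONDITION & SPEC =====
def Spec_WaffleIrons (arr : List Int) (out : Int) : Prop := out = WaffleIrons_alt arr
instance (arr : List Int) (out : Int) : Decidable (Spec_WaffleIrons arr out) := by unfold Spec_WaffleIrons; infer_instance

-- ===== CLAIM (what is proved, stated in full; the proofs are below) =====
def Claim_equal_WaffleIrons : Prop := ∀ (arr : List Int), Dom_WaffleIrons arr → Spec_WaffleIrons arr (WaffleIrons arr)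

-- ===== LEMMAS AND PROOFS =====

-- Joint loop invariant after the first n steps: B's pointer is some k ≤ n, and A's state is
-- (count, temp) = (n - k, (arr[k..n-1]).map (+5)).
theorem WaffleIrons_inv (arr : List Int) (n : Nat) (hn : n ≤ arr.length) :
    ∃ k : Nat, k ≤ n ∧
      (PySem.List.pyRange 0 (n : Int) 1).foldl
        (fun h i =>
          if h < i ∧ PySem.List.pyGetD arr i 0 ≥ PySem.List.pyGetD arr h 0 + 5 then h + 1 else h)
        0 = (k : Int) ∧
      (PySem.List.pyRange 0 (n : Int) 1).foldl
        (fun (st : Int × List Int) i =>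
          let x := PySem.List.pyGetD arr i 0
          if 0 < st.2.length ∧ x ≥ PySem.List.pyGetD st.2 0 0 then
            (st.1, st.2.drop 1 ++ [x + 5])
          else
            let temp' := st.2 ++ [x + 5]
            (max st.1 (temp'.length : Int), temp')) (0, [])
        = (((n : Int) - k), ((arr.take n).drop k).map (· + 5)) := by
  induction n with
  | zero =>
    refine ⟨0, le_refl _, ?_, ?_⟩ <;> simp [PySem.List.pyRange_one_eq_nil]
  | succ n ih =>
    obtain ⟨k, hk, hB, hA⟩ := ih (Nat.le_of_succ_le hn)
    have hnlt : n < arr.length := hn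
    have hsplit : PySem.List.pyRange 0 ((n + 1 : Nat) : Int) 1
        = PySem.List.pyRange 0 (n : Int) 1 ++ [(n : Int)] := by
      push_cast
      exact PySem.List.pyRange_one_succ_right (by positivity)
    -- the values the step reads
    have hxn : PySem.List.pyGetD arr (n : Int) 0 = arr[n] := by
      rw [PySem.List.pyGetD_natCast]; simp [List.getD, hnlt]
    have htake : arr.take (n + 1) = arr.take n ++ [arr[n]] := by
      rw [← List.take_concat_get (i := n) (l := arr) hnlt, List.concat_eq_append]
    rw [hsplit, List.foldl_append, List.foldl_append, hB, hA]
    simp only [List.foldl_cons, List.foldl_nil]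
    by_cases hcond : k < n ∧ arr[n] ≥ arr[k]'(lt_of_lt_of_le (by omega) hn) + 5
    · -- pop branch: both guards fire
      obtain ⟨hklt, hge⟩ := hcond
      have hkarr : k < arr.length := lt_of_lt_of_le hklt (Nat.le_of_succ_le hn)
      have hxk : PySem.List.pyGetD arr (k : Int) 0 = arr[k] := by
        rw [PySem.List.pyGetD_natCast]; simp [List.getD, hkarr]
      have hlen : ((arr.take n).drop k).length = n - k := by
        simp [min_eq_left (le_of_lt hnlt)]
      have hhead : PySem.List.pyGetD (((arr.take n).drop k).map (· + 5)) 0 0 = arr[k] + 5 := by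
        rw [PySem.List.pyGetD_zero]
        have : ((arr.take n).drop k).map (· + 5) = (arr[k]'hkarr + 5) ::
            ((arr.take n).drop (k + 1)).map (· + 5) := by
          rw [(List.drop_eq_getElem_cons (by simp [min_eq_left (le_of_lt hnlt)]; omega) :
            (arr.take n).drop k = _)]
          simp [List.getElem_take]
        simp [this]
      refine ⟨k + 1, by omega, ?_, ?_⟩
      · rw [if_pos ⟨by exact_mod_cast hklt, by rw [hxn, hxk]; exact hge⟩]; push_cast; ring
      · rw [if_pos ⟨by simp only [List.length_map, hlen]; omega, by rw [hxn, hhead]; exact hge⟩]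
        simp only [Prod.mk.injEq]
        constructor
        · push_cast; ring
        · rw [htake, hxn]
          rw [List.drop_append_of_le_length (by simp [min_eq_left (le_of_lt hnlt)]; omega)]
          simp [List.map_drop, List.drop_drop]
      -- A's queue after the pop: drop one more element of arr.take n, then append arr[n]+5
    · -- append branch: both guards fail
      have hkle : (k : Int) ≤ n := by exact_mod_cast hk
      have hBguard : ¬ ((k : Int) < (n : Int) ∧
          PySem.List.pyGetD arr (n : Int) 0 ≥ PySem.List.pyGetD arr (k : Int) 0 + 5) := by
        intro ⟨h1, h2⟩
        have hklt : k < n := by exact_mod_cast h1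
        have hkarr : k < arr.length := lt_of_lt_of_le hklt (Nat.le_of_succ_le hn)
        have hxk : PySem.List.pyGetD arr (k : Int) 0 = arr[k] := by
          rw [PySem.List.pyGetD_natCast]; simp [List.getD, hkarr]
        exact hcond ⟨hklt, by rw [hxn, hxk] at h2; exact h2⟩
      have hlen : ((arr.take n).drop k).length = n - k := by
        simp [min_eq_left (le_of_lt hnlt)]
      have hAguard : ¬ (0 < (((arr.take n).drop k).map (· + 5)).length ∧
          PySem.List.pyGetD arr (n : Int) 0 ≥
            PySem.List.pyGetD (((arr.take n).drop k).map (· + 5)) 0 0) := by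
        intro ⟨h1, h2⟩
        have hklt : k < n := by rw [List.length_map, hlen] at h1; omega
        have hkarr : k < arr.length := lt_of_lt_of_le hklt (Nat.le_of_succ_le hn)
        have hhead : PySem.List.pyGetD (((arr.take n).drop k).map (· + 5)) 0 0 = arr[k] + 5 := by
          rw [PySem.List.pyGetD_zero]
          have : ((arr.take n).drop k).map (· + 5) = (arr[k]'hkarr + 5) ::
              ((arr.take n).drop (k + 1)).map (· + 5) := by
            rw [(List.drop_eq_getElem_cons (by simp [min_eq_left (le_of_lt hnlt)]; omega) :
              (arr.take n).drop k = _)]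
            simp [List.getElem_take]
          simp [this]
        exact hcond ⟨hklt, by rw [hxn] at h2; rw [hhead] at h2; exact h2⟩
      refine ⟨k, Nat.le_succ_of_le hk, by rw [if_neg hBguard], ?_⟩
      rw [if_neg hAguard]
      simp only [Prod.mk.injEq]
      constructor
      · simp only [List.length_append, List.length_map, hlen, List.length_singleton]
        push_cast; omega
      · rw [htake, hxn]
        rw [List.drop_append_of_le_length (by simp [min_eq_left (le_of_lt hnlt)]; omega)]
        simp

-- ===== VERDICT (by name: the statement is the Claim_ definition above) =====
theorem WaffleIrons_spec : Claim_equal_WaffleIrons := by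
  intro arr _
  obtain ⟨k, hk, hB, hA⟩ := WaffleIrons_inv arr arr.length (le_refl _)
  unfold Spec_WaffleIrons WaffleIrons WaffleIrons_alt
  rw [hB, hA]
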